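-- pv_equiv track=rewrite | github.com/COS301-SE-2024/GDPR-data-noncompliance-detector | backend/Detection_Engine/RAG.py | interpret_findings
-- ===== SOURCE A (Python) =====
-- def interpret_findings(labels):
--     #match labels
--     label_to_articles = {
--         'LABEL_1': '5',
--         'LABEL_2': '6',
--         'LABEL_3': ['9','9(1)','9(2)(b)','9(2)(g)'],
--         'LABEL_4': ['6','7(1)','7(2)','7(3)'],
--         'LABEL_5': ['12']
--         }
--
--     unique_labels = set()
--     count = 0
--
--     for label in labels:
--         if label == 'LABEL_4':
--             if label not in unique_labels:
--                 unique_labels.add(label)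
--             count += 2
--         elif label not in unique_labels:
--             unique_labels.add(label)
--             count += 1
--
--     articles = []
--     for label in label_to_articles:
--         if label in labels:
--             articles.extend(label_to_articles[label])
--
--     return articles, count
-- ===== SOURCE B (Python) =====
-- def interpret_findings(labels):
--     present = set(labels)
--     count = 2 * labels.count('LABEL_4') + len(present - {'LABEL_4'})
--     articles = (
--         (['5'] if 'LABEL_1' in present else []) +
--         (['6'] if 'LABEL_2' in present else []) +
--         (['9', '9(1)', '9(2)(b)', '9(2)(g)'] if 'LABEL_3' in present else []) +
--         (['6', '7(1)', '7(2)', '7(3)'] if 'LABEL_4' in present else []) +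
--         (['12'] if 'LABEL_5' in present else [])
--     )
--     return articles, count
-- ===== Notes on version B (the rewrite author's own statement) =====
-- stated objective: simpler
-- what changed: Replaces A's stateful seen-set accumulation loop with a closed-form count (2*occurrences of LABEL_4 plus the number of other distinct labels) and replaces the dict-iteration loop with a direct concatenation of the five fixed article blocks guarded by set membership.
import Mathlib
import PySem

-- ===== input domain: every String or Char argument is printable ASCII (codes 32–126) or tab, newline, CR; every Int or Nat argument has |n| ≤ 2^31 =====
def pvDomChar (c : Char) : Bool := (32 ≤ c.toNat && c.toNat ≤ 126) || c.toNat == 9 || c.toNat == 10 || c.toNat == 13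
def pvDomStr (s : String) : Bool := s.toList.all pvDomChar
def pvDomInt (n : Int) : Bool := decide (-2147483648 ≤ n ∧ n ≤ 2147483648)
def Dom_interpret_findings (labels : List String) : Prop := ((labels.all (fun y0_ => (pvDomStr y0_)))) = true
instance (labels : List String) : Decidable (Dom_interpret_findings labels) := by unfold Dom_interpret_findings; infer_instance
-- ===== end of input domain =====

-- B computes the count in closed form (2*count of 'LABEL_4' + number of other distinct labels)
-- and the article list as one concatenation of guarded fixed blocks, instead of A's stateful loop; objective: simpler.

-- ===== PORT A =====

-- the fixed dict, as its items in insertion order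
def pvItemsA : List (String × List String) :=
  [("LABEL_1", ["5"]), ("LABEL_2", ["6"]),
   ("LABEL_3", ["9", "9(1)", "9(2)(b)", "9(2)(g)"]),
   ("LABEL_4", ["6", "7(1)", "7(2)", "7(3)"]),
   ("LABEL_5", ["12"])]

-- loop body of A's first for-loop
def pvStepA (p : PySem.Set String × Int) (label : String) : PySem.Set String × Int :=
  if label == "LABEL_4" then
    ((if PySem.Set.contains p.1 label then p.1 else PySem.Set.add p.1 label), p.2 + 2)
  else if !(PySem.Set.contains p.1 label) then (PySem.Set.add p.1 label, p.2 + 1)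
  else p

def interpret_findings (labels : List String) : List String × Int :=
  let st := labels.foldl pvStepA (PySem.Set.empty, 0)
  -- 'for label in label_to_articles: if label in labels: articles.extend(label_to_articles[label])'
  -- rendered over the items list (the looked-up value is the key's value)
  let articles := pvItemsA.foldl (fun acc kv => if labels.contains kv.1 then acc ++ kv.2 else acc) []
  (articles, st.2)

-- ===== PORT B =====
def interpret_findings_alt (labels : List String) : List String × Int :=
  let present : PySem.Set String := PySem.Set.ofList labels
  let count : Int := 2 * (PySem.List.count labels "LABEL_4" : Int)
      + (PySem.Set.len (PySem.Set.diff present ["LABEL_4"]) : Int)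
  let articles :=
    (if PySem.Set.contains present "LABEL_1" then ["5"] else []) ++
    (if PySem.Set.contains present "LABEL_2" then ["6"] else []) ++
    (if PySem.Set.contains present "LABEL_3" then ["9", "9(1)", "9(2)(b)", "9(2)(g)"] else []) ++
    (if PySem.Set.contains present "LABEL_4" then ["6", "7(1)", "7(2)", "7(3)"] else []) ++
    (if PySem.Set.contains present "LABEL_5" then ["12"] else [])
  (articles, count)

-- ===== PRECONDITION & SPEC =====
def Spec_interpret_findings (labels : List String) (out : List String × Int) : Prop := out = interpret_findings_alt labels
instance (labels : List String) (out : List String × Int) : Decidable (Spec_interpret_findings labels out) := by unfold Spec_interpret_findings; infer_instance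

-- ===== CLAIM (what is proved, stated in full; the proofs are below) =====
def Claim_equal_interpret_findings : Prop := ∀ (labels : List String), Dom_interpret_findings labels → Spec_interpret_findings labels (interpret_findings labels)

-- ===== LEMMAS AND PROOFS =====

-- number of labels in t that are ≠ LABEL_4 and not yet in s, counting each distinct label once
def pvDn (t : List String) (s : PySem.Set String) : Int :=
  match t with
  | [] => 0
  | l :: t =>
    if l == "LABEL_4" then pvDn t s
    else if PySem.Set.contains s l then pvDn t s
    else 1 + pvDn t (PySem.Set.add s l)

theorem pvContains_congr (s s' : PySem.Set String) (a : String)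
    (h : a ∈ s ↔ a ∈ s') : PySem.Set.contains s a = PySem.Set.contains s' a := by
  by_cases ha : a ∈ s'
  · have h1 : PySem.Set.contains s a = true := (PySem.Set.contains_iff _ _).mpr (h.mpr ha)
    have h2 : PySem.Set.contains s' a = true := (PySem.Set.contains_iff _ _).mpr ha
    rw [h1, h2]
  · have h1 : PySem.Set.contains s a ≠ true := fun hc => ha (h.mp ((PySem.Set.contains_iff _ _).mp hc))
    have h2 : PySem.Set.contains s' a ≠ true := fun hc => ha ((PySem.Set.contains_iff _ _).mp hc)
    simp only [Bool.not_eq_true] at h1 h2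
    rw [h1, h2]

-- pvDn only depends on s through membership of non-LABEL_4 elements
theorem pvDn_congr (t : List String) : ∀ s s' : PySem.Set String,
    (∀ a, a ≠ "LABEL_4" → (a ∈ s ↔ a ∈ s')) → pvDn t s = pvDn t s' := by
  induction t with
  | nil => intro s s' _; rfl
  | cons l t ih =>
    intro s s' h
    by_cases hl : l = "LABEL_4"
    · simp [pvDn, hl, ih s s' h]
    · have hc : PySem.Set.contains s l = PySem.Set.contains s' l :=
        pvContains_congr s s' l (h l hl)
      simp only [pvDn, beq_iff_eq, if_neg hl, hc]
      by_cases hm : PySem.Set.contains s' l = true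
      · rw [if_pos hm, if_pos hm]; exact ih s s' h
      · rw [if_neg hm, if_neg hm]
        have : pvDn t (PySem.Set.add s l) = pvDn t (PySem.Set.add s' l) := by
          apply ih
          intro a ha
          simp only [PySem.Set.mem_add, h a ha]
        rw [this]

-- pvDn as a length of a set update
theorem pvDn_len (t : List String) : ∀ s : PySem.Set String,
    pvDn t s =
      ((PySem.Set.update s (t.filter (fun l => !(l == "LABEL_4")))).length : Int)
        - (s.length : Int) := by
  induction t with
  | nil => intro s; simp [pvDn, PySem.Set.update]
  | cons l t ih =>
    intro s
    by_cases hl : l = "LABEL_4"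
    · simp only [pvDn, hl, List.filter_cons]
      simp [ih s]
    · have hfc : (l :: t).filter (fun l => !(l == "LABEL_4"))
          = l :: t.filter (fun l => !(l == "LABEL_4")) := by
        simp [hl]
      simp only [pvDn, beq_iff_eq, if_neg hl, hfc, PySem.Set.update_cons]
      by_cases hm : PySem.Set.contains s l = true
      · have hmem : l ∈ s := (PySem.Set.contains_iff _ _).mp hm
        rw [if_pos hm, PySem.Set.add_of_mem hmem]
        exact ih s
      · have hmem : l ∉ s := fun hx => hm ((PySem.Set.contains_iff _ _).mpr hx)
        rw [if_neg hm, ih (PySem.Set.add s l), PySem.Set.add_of_not_mem hmem]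
        simp
        ring

-- A's first loop computes 2*count('LABEL_4') + pvDn
theorem pvFoldA (t : List String) : ∀ (s : PySem.Set String) (c : Int),
    (t.foldl pvStepA (s, c)).2 = c + 2 * (t.count "LABEL_4" : Int) + pvDn t s := by
  induction t with
  | nil => intro s c; simp [pvDn]
  | cons l t ih =>
    intro s c
    by_cases hl : l = "LABEL_4"
    · have hstep : pvStepA (s, c) l =
          ((if PySem.Set.contains s l then s else PySem.Set.add s l), c + 2) := by
        simp [pvStepA, hl]
      rw [List.foldl_cons, hstep]
      by_cases hm : PySem.Set.contains s l = true
      · have hmem : l ∈ s := (PySem.Set.contains_iff _ _).mp hm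
        rw [if_pos hm, ih]
        have hd : pvDn t s = pvDn (l :: t) s := by simp [pvDn, hl]
        rw [hd]
        subst hl
        simp
        ring
      · rw [if_neg hm, ih]
        have hd : pvDn t (PySem.Set.add s l) = pvDn t s := by
          apply pvDn_congr
          intro a ha
          rw [PySem.Set.mem_add]
          constructor
          · rintro (h1 | h1)
            · exact h1
            · exact absurd (h1.trans hl) ha
          · exact Or.inl
        rw [hd]
        have hd2 : pvDn t s = pvDn (l :: t) s := by simp [pvDn, hl]
        rw [hd2]
        subst hl
        simp
        ring
    · have hstep : pvStepA (s, c) l =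
          if !(PySem.Set.contains s l) then (PySem.Set.add s l, c + 1) else (s, c) := by
        simp [pvStepA, hl]
      rw [List.foldl_cons, hstep]
      by_cases hm : PySem.Set.contains s l = true
      · rw [hm]
        simp only [Bool.not_true, Bool.false_eq_true, if_false, ih]
        have hd : pvDn (l :: t) s = pvDn t s := by
          simp [pvDn, hl, (PySem.Set.contains_iff _ _).mp hm]
        rw [hd, List.count_cons]
        simp [hl]
      · simp only [Bool.not_eq_true] at hm
        rw [hm]
        simp only [Bool.not_false, if_true, ih]
        have hmem : l ∉ s := fun hx => by
          rw [(PySem.Set.contains_iff _ _).mpr hx] at hm; cases hm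
        have hd : pvDn (l :: t) s = 1 + pvDn t (PySem.Set.add s l) := by
          simp [pvDn, hl, hmem]
        rw [hd, List.count_cons]
        simp [hl]
        ring

-- B's distinct-count term equals the update-length form pvDn reaches
theorem pvDiff_len (labels : List String) :
    (PySem.Set.diff (PySem.Set.ofList labels) ["LABEL_4"]).length
      = (PySem.Set.ofList (labels.filter (fun l => !(l == "LABEL_4")))).length := by
  apply List.Perm.length_eq
  rw [List.perm_ext_iff_of_nodup
      (PySem.Set.nodup_diff _ _ (PySem.Set.nodup_ofList _)) (PySem.Set.nodup_ofList _)]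
  intro a
  rw [PySem.Set.mem_diff _ _ a, PySem.Set.mem_ofList, PySem.Set.mem_ofList, List.mem_filter]
  simp

theorem pvContains_ofList (labels : List String) (a : String) :
    PySem.Set.contains (PySem.Set.ofList labels) a = labels.contains a := by
  by_cases h : a ∈ labels
  · rw [(PySem.Set.contains_iff _ _).mpr ((PySem.Set.mem_ofList _ _).mpr h),
      List.contains_eq_mem]
    simp [h]
  · have h1 : PySem.Set.contains (PySem.Set.ofList labels) a ≠ true := fun hc =>
      h ((PySem.Set.mem_ofList _ _).mp ((PySem.Set.contains_iff _ _).mp hc))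
    simp only [Bool.not_eq_true] at h1
    rw [h1, List.contains_eq_mem]
    simp [h]

-- ===== VERDICT (by name: the statement is the Claim_ definition above) =====
theorem interpret_findings_spec : Claim_equal_interpret_findings := by
  intro labels _
  unfold Spec_interpret_findings interpret_findings interpret_findings_alt
  refine Prod.ext ?_ ?_
  · -- articles
    simp only [pvItemsA, List.foldl_cons, List.foldl_nil, pvContains_ofList]
    by_cases h1 : labels.contains "LABEL_1" = true <;>
    by_cases h2 : labels.contains "LABEL_2" = true <;>
    by_cases h3 : labels.contains "LABEL_3" = true <;>
    by_cases h4 : labels.contains "LABEL_4" = true <;>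
    by_cases h5 : labels.contains "LABEL_5" = true <;>
      simp_all
  · -- count
    simp only
    rw [pvFoldA]
    rw [show pvDn labels PySem.Set.empty
        = ((PySem.Set.update PySem.Set.empty
            (labels.filter (fun l => !(l == "LABEL_4")))).length : Int)
          - ((PySem.Set.empty : PySem.Set String).length : Int) from pvDn_len labels _]
    rw [show (PySem.Set.update (PySem.Set.empty) (labels.filter (fun l => !(l == "LABEL_4"))))
        = PySem.Set.ofList (labels.filter (fun l => !(l == "LABEL_4"))) from
        PySem.Set.update_nil_left _]
    rw [PySem.Set.len, pvDiff_len]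
    simp [PySem.Set.empty, PySem.List.count_eq]
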